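-- pv_equiv track=rewrite | github.com/Bullish-Intelligence/remora | .context/fsdantic/src/fsdantic/_internal/paths.py | collapse_duplicate_slashes
-- ===== SOURCE A (Python) =====
-- def collapse_duplicate_slashes(path: str) -> str:
--     """Collapse repeated path separators into single slashes."""
--     if not path:
--         return path
--
--     collapsed: list[str] = []
--     previous_was_slash = False
--     for char in path:
--         if char == "/":
--             if previous_was_slash:
--                 continue
--             previous_was_slash = True
--         else:
--             previous_was_slash = False
--         collapsed.append(char)
--     return "".join(collapsed)
-- ===== SOURCE B (Python) =====
-- from itertools import groupby
--
--
-- def collapse_duplicate_slashes(path: str) -> str: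
--     """Collapse repeated path separators into single slashes."""
--     if not path:
--         return path
--     return "".join(
--         "/" if is_slash else "".join(run)
--         for is_slash, run in groupby(path, key=lambda c: c == "/")
--     )
-- ===== Notes on version B (the rewrite author's own statement) =====
-- stated objective: idiomatic
-- what changed: Replaces the stateful per-character loop with a previous-was-slash flag by an itertools.groupby over runs, emitting one separator per slash run and non-slash runs unchanged.
import Mathlib
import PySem

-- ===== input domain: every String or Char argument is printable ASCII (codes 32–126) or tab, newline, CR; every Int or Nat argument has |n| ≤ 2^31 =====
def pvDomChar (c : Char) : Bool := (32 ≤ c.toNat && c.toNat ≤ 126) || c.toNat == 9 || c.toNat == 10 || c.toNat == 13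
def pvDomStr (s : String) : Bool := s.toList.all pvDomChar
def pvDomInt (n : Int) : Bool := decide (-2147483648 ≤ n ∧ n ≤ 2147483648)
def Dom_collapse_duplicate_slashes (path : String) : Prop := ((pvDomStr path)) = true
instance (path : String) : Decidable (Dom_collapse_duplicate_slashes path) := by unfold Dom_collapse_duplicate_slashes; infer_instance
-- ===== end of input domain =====

-- B replaces A's stateful per-character loop (previous_was_slash flag) by a run-based
-- groupby decomposition: one '/' per slash run, non-slash runs unchanged (idiomatic; same cost).

-- ===== PORT A =====
-- literal port: accumulate chars with a previous_was_slash flag, skipping a '/' after a '/'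
def collapse_duplicate_slashes (path : String) : String :=
  if path = "" then path
  else
    let st := path.toList.foldl
      (fun (st : List Char × Bool) c =>
        if c = '/' then
          if st.2 then st
          else (st.1 ++ [c], true)
        else (st.1 ++ [c], false))
      ([], false)
    String.mk st.1

-- ===== PORT B =====
-- run-splitting, mirroring itertools.groupby keyed by (c == '/'):
-- a slash run contributes a single '/', a non-slash run is emitted verbatim
def pvAltRuns : List Char → List Char
  | [] => []
  | c :: rest =>
    if c = '/' then
      '/' :: pvAltRuns (rest.dropWhile (fun d => d = '/'))
    else
      (c :: rest.takeWhile (fun d => !decide (d = '/'))) ++ pvAltRuns (rest.dropWhile (fun d => !decide (d = '/')))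
termination_by l => l.length
decreasing_by
  · have := List.length_dropWhile_le (fun d => decide (d = '/')) rest
    simp; omega
  · have := List.length_dropWhile_le (fun d => !decide (d = '/')) rest
    simp; omega

def collapse_duplicate_slashes_alt (path : String) : String :=
  if path = "" then path
  else String.mk (pvAltRuns path.toList)

-- ===== PRECONDITION & SPEC =====
def Spec_collapse_duplicate_slashes (path : String) (out : String) : Prop := out = collapse_duplicate_slashes_alt path
instance (path : String) (out : String) : Decidable (Spec_collapse_duplicate_slashes path out) := by unfold Spec_collapse_duplicate_slashes; infer_instance

-- ===== CLAIM (what is proved, stated in full; the proofs are below) =====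
def Claim_equal_collapse_duplicate_slashes : Prop := ∀ (path : String), Dom_collapse_duplicate_slashes path → Spec_collapse_duplicate_slashes path (collapse_duplicate_slashes path)

-- ===== LEMMAS AND PROOFS =====

-- A's loop as a simple structural recursion on the char list
def pvAGo : List Char → Bool → List Char
  | [], _ => []
  | c :: rest, prev =>
    if c = '/' then
      if prev then pvAGo rest true else c :: pvAGo rest true
    else c :: pvAGo rest false

theorem pvFoldA (l : List Char) (acc : List Char) (prev : Bool) :
    (l.foldl
      (fun (st : List Char × Bool) c =>
        if c = '/' then
          if st.2 then st
          else (st.1 ++ [c], true)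
        else (st.1 ++ [c], false))
      (acc, prev)).1 = acc ++ pvAGo l prev := by
  induction l generalizing acc prev with
  | nil => simp [pvAGo]
  | cons c rest ih =>
    by_cases hc : c = '/'
    · cases prev <;> simp [pvAGo, hc, ih]
    · simp [pvAGo, hc, ih]

-- skipping the leading run is absorbed: takeWhile ++ pvAltRuns ∘ dropWhile = pvAltRuns
theorem pvRuns_absorb (l : List Char) :
    l.takeWhile (fun d => !decide (d = '/')) ++ pvAltRuns (l.dropWhile (fun d => !decide (d = '/'))) = pvAltRuns l := by
  induction l with
  | nil => simp [pvAltRuns]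
  | cons d l' ih =>
    by_cases hd : d = '/'
    · simp [hd]
    · simp only [List.takeWhile_cons, List.dropWhile_cons, hd, decide_not, decide_eq_false,
        not_false_iff, Bool.not_false, ite_true]
      simp [hd, pvAltRuns]

theorem pvAGo_eq (l : List Char) :
    pvAGo l false = pvAltRuns l ∧ pvAGo l true = pvAltRuns (l.dropWhile (fun d => d = '/')) := by
  induction l with
  | nil => simp [pvAGo, pvAltRuns]
  | cons c rest ih =>
    by_cases hc : c = '/'
    · constructor
      · simp [pvAGo, pvAltRuns, hc, ih.2]
      · simp [pvAGo, hc, ih.2]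
    · have hne : pvAltRuns (c :: rest) = c :: pvAltRuns rest := by
        simp [pvAltRuns, hc]
        exact pvRuns_absorb rest
      constructor
      · simp [pvAGo, hc, ih.1, hne]
      · simp [pvAGo, hc, ih.1, hne]

-- ===== VERDICT (by name: the statement is the Claim_ definition above) =====
theorem collapse_duplicate_slashes_spec : Claim_equal_collapse_duplicate_slashes := by
  intro path _
  unfold Spec_collapse_duplicate_slashes collapse_duplicate_slashes collapse_duplicate_slashes_alt
  by_cases h : path = ""
  · simp [h]
  · simp only [h, ite_false]
    rw [pvFoldA, List.nil_append, (pvAGo_eq path.toList).1]
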